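-- pv_equiv track=rewrite | github.com/tum-ens/urbs | urbs/features/transmission.py | remove_duplicate_transmission
-- ===== SOURCE A (Python) =====
-- def remove_duplicate_transmission(transmission_keys):
--     # removing duplicate transmissions for DCPF
--     tra_tuple_list = list(transmission_keys)
--     tra_tuple_list = sorted(tra_tuple_list, key=lambda x: x[1])
--     i = 0
--     while i < len(tra_tuple_list):
--         for k in range(len(tra_tuple_list)):
--             if (tra_tuple_list[i][1] == tra_tuple_list[k][2] and
--                     tra_tuple_list[i][2] == tra_tuple_list[k][1] and
--                     tra_tuple_list[i][0] == tra_tuple_list[k][0] and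
--                     tra_tuple_list[i][3] == tra_tuple_list[k][3]):
--                 del tra_tuple_list[i]
--                 i -= 1
--                 break
--         i += 1
--     return set(tra_tuple_list)
-- ===== SOURCE B (Python) =====
-- def remove_duplicate_transmission(transmission_keys):
--     # one pass: keep a tuple unless it is a self-loop or it is the
--     # smaller-node member of a reverse pair that is also present
--     S = set(transmission_keys)
--     return {t for t in sorted(transmission_keys, key=lambda x: x[1])
--             if t[1] != t[2] and not (t[1] < t[2] and (t[0], t[2], t[1], t[3]) in S)}
-- ===== Notes on version B (the rewrite author's own statement) =====
-- stated objective: faster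
-- what changed: A's fixpoint loop that repeatedly rescans the whole list and deletes in place is replaced by a membership set built once plus a single filtering pass that keeps a tuple unless it is a self-loop or the smaller-node member of a present reverse pair.
import Mathlib
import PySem

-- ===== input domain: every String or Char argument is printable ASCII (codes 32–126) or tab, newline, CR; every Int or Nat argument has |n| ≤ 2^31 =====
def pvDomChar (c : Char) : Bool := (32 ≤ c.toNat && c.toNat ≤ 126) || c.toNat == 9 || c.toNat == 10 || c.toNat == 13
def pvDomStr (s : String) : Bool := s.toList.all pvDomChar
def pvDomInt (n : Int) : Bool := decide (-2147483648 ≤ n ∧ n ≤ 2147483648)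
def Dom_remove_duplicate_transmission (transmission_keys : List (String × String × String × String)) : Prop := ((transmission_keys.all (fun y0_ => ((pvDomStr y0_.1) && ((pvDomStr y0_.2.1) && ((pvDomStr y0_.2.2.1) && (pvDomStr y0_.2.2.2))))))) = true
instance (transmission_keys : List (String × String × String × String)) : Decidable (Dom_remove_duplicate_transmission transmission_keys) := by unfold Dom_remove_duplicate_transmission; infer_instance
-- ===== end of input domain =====

-- B replaces A's repeated-scan-and-delete fixpoint loop with one filtering pass that
-- keeps a tuple by a direct per-tuple predicate against a membership set built once.

-- ===== PORT A =====
-- the inner 'for k' scan's match condition: tra[i][1]==tra[k][2] and tra[i][2]==tra[k][1]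
-- and tra[i][0]==tra[k][0] and tra[i][3]==tra[k][3]
def pvMatchA (t u : String × String × String × String) : Bool :=
  t.2.1 == u.2.2.1 && t.2.2.1 == u.2.1 && t.1 == u.1 && t.2.2.2 == u.2.2.2

-- A's 'while i < len: for k …: if match: del tra[i]; i -= 1; break; i += 1' loop
-- (after a deletion, 'i -= 1; break' followed by 'i += 1' leaves i unchanged)
def pvLoopA (L : List (String × String × String × String)) (i : Nat) :
    List (String × String × String × String) :=
  if h : i < L.length then
    if L.any (fun u => pvMatchA L[i] u) then
      pvLoopA (L.eraseIdx i) i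
    else
      pvLoopA L (i + 1)
  else L
termination_by L.length - i
decreasing_by
  · simp [List.length_eraseIdx, h]; omega
  · omega

def remove_duplicate_transmission (transmission_keys : List (String × String × String × String)) : List (String × String × String × String) :=
  -- tra_tuple_list = sorted(list(transmission_keys), key=lambda x: x[1])
  let tra := PySem.List.sorted transmission_keys (fun x => x.2.1) false
  -- return set(tra_tuple_list) after running the deletion loop
  PySem.Set.ofList (pvLoopA tra 0)

-- ===== PORT B =====
def remove_duplicate_transmission_alt (transmission_keys : List (String × String × String × String)) : List (String × String × String × String) :=
  -- S = set(transmission_keys)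
  let S := PySem.Set.ofList transmission_keys
  -- {t for t in sorted(transmission_keys, key=lambda x: x[1])
  --    if t[1] != t[2] and not (t[1] < t[2] and (t[0], t[2], t[1], t[3]) in S)}
  PySem.Set.ofList
    ((PySem.List.sorted transmission_keys (fun x => x.2.1) false).filter
      (fun t => !(t.2.1 == t.2.2.1) &&
        !(decide (t.2.1 < t.2.2.1) && PySem.Set.contains S (t.1, t.2.2.1, t.2.1, t.2.2.2))))

-- ===== PRECONDITION & SPEC =====
def Spec_remove_duplicate_transmission (transmission_keys : List (String × String × String × String)) (out : List (String × String × String × String)) : Prop := out = remove_duplicate_transmission_alt transmission_keys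
instance (transmission_keys : List (String × String × String × String)) (out : List (String × String × String × String)) : Decidable (Spec_remove_duplicate_transmission transmission_keys out) := by unfold Spec_remove_duplicate_transmission; infer_instance

-- ===== CLAIM (what is proved, stated in full; the proofs are below) =====
def Claim_equal_remove_duplicate_transmission : Prop := ∀ (transmission_keys : List (String × String × String × String)), Dom_remove_duplicate_transmission transmission_keys → Spec_remove_duplicate_transmission transmission_keys (remove_duplicate_transmission transmission_keys)

-- ===== LEMMAS AND PROOFS =====

-- the reverse-direction tuple of t
def pvRev (t : String × String × String × String) : String × String × String × String :=
  (t.1, t.2.2.1, t.2.1, t.2.2.2)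

theorem pvMatchA_iff (t u : String × String × String × String) :
    pvMatchA t u = true ↔ u = pvRev t := by
  cases t with | mk a t => cases t with | mk b t => cases t with | mk c d =>
  cases u with | mk a' u => cases u with | mk b' u => cases u with | mk c' d' =>
  simp only [pvMatchA, Bool.and_eq_true, beq_iff_eq, pvRev, Prod.ext_iff]
  constructor <;> intro h <;> simp_all

theorem pvRev_rev (t : String × String × String × String) : pvRev (pvRev t) = t := rfl

theorem pvRev_self (t : String × String × String × String) (h : t.2.1 = t.2.2.1) :
    pvRev t = t := by
  cases t with | mk a t => cases t with | mk b t => cases t with | mk c d =>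
  simp_all [pvRev]

-- deleting the element at index p.length removes the head of the right part
theorem pvEraseMid (t : String × String × String × String)
    (rt : List (String × String × String × String)) :
    ∀ p : List (String × String × String × String),
      (p ++ t :: rt).eraseIdx p.length = p ++ rt := by
  intro p
  induction p with
  | nil => simp
  | cons x xs ih => simp [ih]

-- Invariant of A's deletion loop on a key-sorted list p ++ r (p = the already-processed
-- prefix, none of whose reverses are still present): the survivors are exactly the
-- elements kept by B's predicate.  An element t is deleted iff its reverse is present
-- when it is reached, which (by sortedness) happens iff t is a self-loop or t is the
-- smaller-key member of a present reverse pair.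
theorem pvLoopA_eq_filter :
    ∀ (r p : List (String × String × String × String)),
      (p ++ r).Pairwise (fun a b => a.2.1 ≤ b.2.1) →
      (∀ t ∈ p, pvRev t ∉ p ++ r) →
      pvLoopA (p ++ r) p.length =
        p ++ r.filter (fun t => !(t.2.1 == t.2.2.1) &&
          !(decide (t.2.1 < t.2.2.1) && decide (pvRev t ∈ p ++ r))) := by
  intro r
  induction r with
  | nil =>
    intro p _ _
    rw [pvLoopA]
    simp
  | cons t rt ih =>
    intro p hpw hinv
    have hlen : p.length < (p ++ t :: rt).length := by simp
    have hget : (p ++ t :: rt)[p.length]'hlen = t := by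
      rw [List.getElem_append_right (le_refl p.length)]
      simp
    have hanyiff : ((p ++ t :: rt).any (fun u => pvMatchA t u) = true) ↔
        pvRev t ∈ p ++ t :: rt := by
      simp only [List.any_eq_true, pvMatchA_iff]
      constructor
      · rintro ⟨u, hu, rfl⟩; exact hu
      · intro h; exact ⟨_, h, rfl⟩
    rw [pvLoopA, dif_pos hlen, hget]
    by_cases hc : pvRev t ∈ p ++ t :: rt
    · -- DELETE case: the head's reverse is present; A deletes the head
      rw [if_pos (hanyiff.mpr hc), pvEraseMid]
      -- the head's reverse is not in p, so it is the head itself or a later element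
      have hle : t.2.1 ≤ t.2.2.1 := by
        rcases List.mem_append.1 hc with hp | htr
        · have h1 := hinv _ hp
          rw [pvRev_rev] at h1
          exact absurd (List.mem_append_right p List.mem_cons_self) h1
        · rcases List.mem_cons.1 htr with heq | hrt
          · exact (congrArg (fun x => x.2.1) heq).ge
          · exact (List.pairwise_cons.1 (List.pairwise_append.1 hpw).2.1).1 _ hrt
      have hsub : (p ++ rt).Sublist (p ++ t :: rt) :=
        List.Sublist.append_left (List.sublist_cons_self t rt) p
      rw [ih p (hpw.sublist hsub) (fun u hu hmem => hinv u hu (hsub.subset hmem))]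
      -- the head t is dropped by the filter predicate as well
      have hpredt : (!(t.2.1 == t.2.2.1) &&
          !(decide (t.2.1 < t.2.2.1) && decide (pvRev t ∈ p ++ t :: rt))) = false := by
        by_cases heq : t.2.1 = t.2.2.1
        · simp [heq]
        · simp [lt_of_le_of_ne hle heq, hc]
      rw [List.filter_cons, hpredt]
      simp only [Bool.false_eq_true, if_false]
      congr 1
      apply List.filter_congr
      intro u hu
      by_cases hult : u.2.1 < u.2.2.1
      · -- removing t (whose key is ≤ its partner's) cannot be the reverse of a
        -- strictly-smaller-key element u, so u's membership test is unchanged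
        have hne : pvRev u ≠ t := by
          intro h
          have hu' : u = pvRev t := by rw [← pvRev_rev u, h]
          have h1 : u.2.1 = t.2.2.1 := congrArg (fun x => x.2.1) hu'
          have h2 : u.2.2.1 = t.2.1 := congrArg (fun x => x.2.2.1) hu'
          rw [h1, h2] at hult
          exact absurd hult (not_lt.2 hle)
        have hmemiff : (pvRev u ∈ p ++ rt) ↔ (pvRev u ∈ p ++ t :: rt) := by
          simp only [List.mem_append, List.mem_cons]
          tauto
        simp [hmemiff]
      · simp [hult]
    · -- ADVANCE case: no reverse present; A keeps the head and moves on
      rw [if_neg (fun h => hc (hanyiff.mp h))]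
      have hpw2 : ((p ++ [t]) ++ rt).Pairwise (fun a b => a.2.1 ≤ b.2.1) := by
        rw [List.append_assoc, List.singleton_append]; exact hpw
      have hinv2 : ∀ u ∈ p ++ [t], pvRev u ∉ (p ++ [t]) ++ rt := by
        intro u hu
        rw [List.append_assoc, List.singleton_append]
        rcases List.mem_append.1 hu with h | h
        · exact hinv u h
        · rw [List.mem_singleton.1 h]; exact hc
      have ih' := ih (p ++ [t]) hpw2 hinv2
      simp only [List.append_assoc, List.singleton_append, List.length_append,
        List.length_cons, List.length_nil, Nat.zero_add] at ih'
      rw [ih']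
      have hpredt : (!(t.2.1 == t.2.2.1) &&
          !(decide (t.2.1 < t.2.2.1) && decide (pvRev t ∈ p ++ t :: rt))) = true := by
        have hne : t.2.1 ≠ t.2.2.1 := by
          intro heq
          exact hc (by rw [pvRev_self t heq]; simp)
        simp [hne, hc]
      rw [List.filter_cons, hpredt]
      simp

-- ===== VERDICT (by name: the statement is the Claim_ definition above) =====
theorem remove_duplicate_transmission_spec : Claim_equal_remove_duplicate_transmission := by
  intro xs _
  have h := pvLoopA_eq_filter (PySem.List.sorted xs (fun x => x.2.1) false) []
    (by simpa using PySem.List.sorted_pairwise xs (fun x => x.2.1)) (by simp)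
  simp only [List.nil_append, List.length_nil] at h
  show PySem.Set.ofList (pvLoopA (PySem.List.sorted xs (fun x => x.2.1) false) 0) =
    PySem.Set.ofList ((PySem.List.sorted xs (fun x => x.2.1) false).filter
      (fun t => !(t.2.1 == t.2.2.1) && !(decide (t.2.1 < t.2.2.1) &&
        PySem.Set.contains (PySem.Set.ofList xs) (t.1, t.2.2.1, t.2.1, t.2.2.2))))
  rw [h]
  apply congrArg
  apply List.filter_congr
  intro u hu
  have : PySem.Set.contains (PySem.Set.ofList xs) (u.1, u.2.2.1, u.2.1, u.2.2.2) =
      decide (pvRev u ∈ PySem.List.sorted xs (fun x => x.2.1) false) := by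
    simp [PySem.Set.contains, PySem.Set.mem_ofList, PySem.List.mem_sorted, pvRev]
  rw [this]
  rfl
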